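-- pv_equiv track=rewrite | github.com/PieterJansma/IKNL_app | final_iknl_exe_ready.py | make_unique_treat_types
-- ===== SOURCE A (Python) =====
-- def make_unique_treat_types(treat_list):
--     """
--     Makes treatment codes unique by appending a numeric suffix to duplicates.
--     Keeps the first occurrence unchanged.
--     """
--     seen = {}
--     result = []
--
--     for code in treat_list:
--         count = seen.get(code, 0)
--         new_code = f"{code}" if count == 0 else f"{code}_{count}"
--         result.append(new_code)
--         seen[code] = count + 1
--
--     return result
-- ===== SOURCE B (Python) =====
-- def make_unique_treat_types(treat_list):
--     """
--     Makes treatment codes unique by appending a numeric suffix to duplicates.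
--     Keeps the first occurrence unchanged.
--     Group-then-fill re-implementation: first index every code's occurrence
--     positions, then scatter the suffixed names back into a result list.
--     """
--     positions = {}
--     for i, code in enumerate(treat_list):
--         positions.setdefault(code, []).append(i)
--     result = [""] * len(treat_list)
--     for code, idxs in positions.items():
--         for j, idx in enumerate(idxs):
--             result[idx] = code if j == 0 else f"{code}_{j}"
--     return result
-- ===== Notes on version B (the rewrite author's own statement) =====
-- stated objective: alternative
-- what changed: Replaces the streaming pass with a running 'seen' counter dict by a group-then-fill structure: one pass groups each code's occurrence positions into a dict of index lists, then a second loop scatters 'code' / 'code_j' back into a preallocated result at the original positions.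
import Mathlib
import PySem

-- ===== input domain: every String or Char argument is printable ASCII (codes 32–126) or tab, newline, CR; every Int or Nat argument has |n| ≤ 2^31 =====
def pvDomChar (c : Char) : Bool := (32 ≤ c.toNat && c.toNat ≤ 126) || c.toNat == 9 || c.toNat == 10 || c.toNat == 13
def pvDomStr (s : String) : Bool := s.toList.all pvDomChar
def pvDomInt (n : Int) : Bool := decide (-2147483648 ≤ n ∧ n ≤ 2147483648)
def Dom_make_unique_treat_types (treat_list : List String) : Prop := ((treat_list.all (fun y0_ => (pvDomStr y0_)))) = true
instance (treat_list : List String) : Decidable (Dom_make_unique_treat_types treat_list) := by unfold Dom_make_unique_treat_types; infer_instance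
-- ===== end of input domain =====

-- B replaces A's streaming pass with a running 'seen' counter dict by a group-then-fill structure
-- (index each code's occurrence positions, then scatter the suffixed names back); objective: alternative.

-- ===== PORT A =====
-- literal port of A: one pass, a 'seen' dict as running counter, appending to 'result'
def make_unique_treat_types (treat_list : List String) : List String :=
  (treat_list.foldl
    (fun (st : PySem.Dict String Int × List String) code =>
      let count := st.1.getD code 0
      let new_code := if count == 0 then code else code ++ "_" ++ PySem.Int.toStr count
      (st.1.insert code (count + 1), st.2 ++ [new_code]))
    (PySem.Dict.empty, [])).2

-- ===== PORT B =====
-- literal port of B: group occurrence positions per code, then scatter-fill a preallocated result;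
-- 'positions.setdefault(code, []).append(i)' is d[code] = d.get(code, []) + [i], i.e. Dict.modify.
def make_unique_treat_types_alt (treat_list : List String) : List String :=
  let positions := (PySem.List.enumerate treat_list).foldl
    (fun (d : PySem.Dict String (List Int)) p => d.modify p.2 [] (fun is => is ++ [p.1]))
    PySem.Dict.empty
  positions.items.foldl
    (fun res ci =>
      (PySem.List.enumerate ci.2).foldl
        (fun res q =>
          PySem.List.pySetD res q.2 (if q.1 == 0 then ci.1 else ci.1 ++ "_" ++ PySem.Int.toStr q.1))
        res)
    (List.replicate treat_list.length "")

-- ===== PRECONDITION & SPEC =====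
def Spec_make_unique_treat_types (treat_list : List String) (out : List String) : Prop := out = make_unique_treat_types_alt treat_list
instance (treat_list : List String) (out : List String) : Decidable (Spec_make_unique_treat_types treat_list out) := by unfold Spec_make_unique_treat_types; infer_instance

-- ===== CLAIM (what is proved, stated in full; the proofs are below) =====
def Claim_equal_make_unique_treat_types : Prop := ∀ (treat_list : List String), Dom_make_unique_treat_types treat_list → Spec_make_unique_treat_types treat_list (make_unique_treat_types treat_list)

-- ===== LEMMAS AND PROOFS =====

-- the output element for code x whose prefix already contains c occurrences of x
def pvMk (x : String) (c : Int) : String :=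
  if c == 0 then x else x ++ "_" ++ PySem.Int.toStr c

-- reference specification, processed prefix made explicit
def pvSpecGo : List String → List String → List String
  | _, [] => []
  | pre, x :: rest => pvMk x (pre.count x) :: pvSpecGo (pre ++ [x]) rest

-- the (increasing) list of positions at which code c occurs in tl
def pvIdxs (tl : List String) (c : String) : List Int :=
  ((PySem.List.enumerate tl).filter (fun p => p.2 == c)).map (·.1)

-- the flattened list of (position, value) writes B performs
def pvWrites (tl : List String) : List (Int × String) :=
  (PySem.Set.ofList tl).flatMap
    (fun c => (PySem.List.enumerate (pvIdxs tl c)).map (fun q => (q.2, pvMk c q.1)))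

-- ---- A's loop computes pvSpecGo; invariant: the dict holds the counts of the processed prefix ----
theorem pvA_loop (rest : List String) : ∀ (pre : List String) (d : PySem.Dict String Int) (acc : List String),
    (∀ c, d.getD c 0 = (pre.count c : Int)) →
    (rest.foldl
      (fun (st : PySem.Dict String Int × List String) code =>
        let count := st.1.getD code 0
        let new_code := if count == 0 then code else code ++ "_" ++ PySem.Int.toStr count
        (st.1.insert code (count + 1), st.2 ++ [new_code]))
      (d, acc)).2 = acc ++ pvSpecGo pre rest := by
  induction rest with
  | nil => intro pre d acc _; simp [pvSpecGo]
  | cons x rest ih =>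
    intro pre d acc h
    simp only [List.foldl_cons, pvSpecGo]
    rw [ih (pre ++ [x]) _ _ ?_]
    · simp [h x, pvMk]
    · intro c
      rw [PySem.Dict.getD_insert]
      by_cases hc : c = x
      · subst hc; simp [h c, List.count_append]
      · simp [hc, Ne.symm hc, h c, List.count_append]

-- ---- the specification, element-wise ----
theorem pvSpecGo_length : ∀ (rest pre : List String), (pvSpecGo pre rest).length = rest.length := by
  intro rest
  induction rest with
  | nil => intro pre; simp [pvSpecGo]
  | cons x rest ih => intro pre; simp [pvSpecGo, ih]

theorem pvSpecGo_getElem? : ∀ (rest pre : List String) (k : Nat) (hk : k < rest.length),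
    (pvSpecGo pre rest)[k]? = some (pvMk rest[k] (((pre ++ rest.take k).count rest[k] : Int))) := by
  intro rest
  induction rest with
  | nil => intro pre k hk; simp at hk
  | cons x rest ih =>
    intro pre k hk
    cases k with
    | zero => simp [pvSpecGo]
    | succ k =>
      simp only [pvSpecGo, List.getElem?_cons_succ, List.getElem_cons_succ, List.take_succ_cons]
      rw [ih (pre ++ [x]) k (by simpa using hk)]
      simp [List.append_assoc]

-- ---- the grouping dict that B builds ----
theorem pvDict_getD (tl : List String) (c : String) :
    ((PySem.List.enumerate tl).foldl
      (fun (d : PySem.Dict String (List Int)) p => d.modify p.2 [] (fun is => is ++ [p.1]))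
      PySem.Dict.empty).getD c [] = pvIdxs tl c := by
  have hswap : (PySem.List.enumerate tl).foldl
      (fun (d : PySem.Dict String (List Int)) p => d.modify p.2 [] (fun is => is ++ [p.1]))
      PySem.Dict.empty
      = ((PySem.List.enumerate tl).map Prod.swap).foldl
      (fun (d : PySem.Dict String (List Int)) p => d.modify p.1 [] (fun is => is ++ [p.2]))
      PySem.Dict.empty := by
    rw [List.foldl_map]; rfl
  rw [hswap, PySem.Dict.getD_foldl_modify_append]
  simp [pvIdxs, List.filter_map, List.map_map, Function.comp_def, Prod.swap]

theorem pvDict_keys (tl : List String) :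
    ((PySem.List.enumerate tl).foldl
      (fun (d : PySem.Dict String (List Int)) p => d.modify p.2 [] (fun is => is ++ [p.1]))
      PySem.Dict.empty).keys = PySem.Set.ofList tl := by
  rw [PySem.Dict.keys_foldl_modify_key]
  simp [PySem.Set.update_nil_left, PySem.List.map_snd_enumerate]

theorem pvDict_items (tl : List String) :
    ((PySem.List.enumerate tl).foldl
      (fun (d : PySem.Dict String (List Int)) p => d.modify p.2 [] (fun is => is ++ [p.1]))
      PySem.Dict.empty).items = (PySem.Set.ofList tl).map (fun c => (c, pvIdxs tl c)) := by
  rw [PySem.Dict.items_eq_map_keys _ (by rw [pvDict_keys]; exact PySem.Set.nodup_ofList tl) []]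
  rw [pvDict_keys]
  exact List.map_congr_left (fun c _ => by rw [pvDict_getD])

-- ---- flattening B's nested fill loops into one write list ----
theorem pvFoldFold (items : List (String × List Int)) : ∀ (res : List String),
    items.foldl
      (fun res ci =>
        (PySem.List.enumerate ci.2).foldl
          (fun res q =>
            PySem.List.pySetD res q.2 (if q.1 == 0 then ci.1 else ci.1 ++ "_" ++ PySem.Int.toStr q.1))
          res)
      res
    = (items.flatMap (fun ci => (PySem.List.enumerate ci.2).map (fun q => (q.2, pvMk ci.1 q.1)))).foldl
        (fun res w => PySem.List.pySetD res w.1 w.2) res := by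
  induction items with
  | nil => intro res; simp
  | cons ci items ih =>
    intro res
    simp only [List.foldl_cons, List.flatMap_cons, List.foldl_append, ih, List.foldl_map]
    rfl

-- ---- generic facts about a list of writes folded with pySetD ----
theorem pvFill_length (ws : List (Int × String)) : ∀ (res : List String),
    (ws.foldl (fun r w => PySem.List.pySetD r w.1 w.2) res).length = res.length := by
  induction ws with
  | nil => intro res; rfl
  | cons w ws ih => intro res; rw [List.foldl_cons, ih, PySem.List.length_pySetD]

theorem pvFill_untouched (ws : List (Int × String)) : ∀ (res : List String) (k : Nat),
    (∀ w ∈ ws, 0 ≤ w.1) → (k : Int) ∉ ws.map (·.1) →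
    (ws.foldl (fun r w => PySem.List.pySetD r w.1 w.2) res)[k]? = res[k]? := by
  induction ws with
  | nil => intro res k _ _; rfl
  | cons w ws ih =>
    intro res k hpos hk
    simp only [List.map_cons, List.mem_cons, not_or] at hk
    rw [List.foldl_cons, ih _ k (fun w hw => hpos w (List.mem_cons_of_mem _ hw)) hk.2]
    rw [PySem.List.pySetD_of_nonneg _ _ (hpos w (List.mem_cons_self ..))]
    exact List.getElem?_set_ne (by
      have h1 := hpos w (List.mem_cons_self ..)
      have h2 := hk.1
      omega)

theorem pvFill_get (ws : List (Int × String)) : ∀ (res : List String) (k : Nat) (v : String),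
    (∀ w ∈ ws, 0 ≤ w.1) → (ws.map (·.1)).Nodup → ((k : Int), v) ∈ ws → k < res.length →
    (ws.foldl (fun r w => PySem.List.pySetD r w.1 w.2) res)[k]? = some v := by
  induction ws with
  | nil => intro _ _ _ _ _ hmem _; simp at hmem
  | cons w ws ih =>
    intro res k v hpos hnd hmem hk
    rw [List.map_cons] at hnd
    obtain ⟨hnotin, hndtail⟩ := List.nodup_cons.mp hnd
    rcases List.mem_cons.mp hmem with heq | hmem'
    · subst heq
      rw [List.foldl_cons]
      rw [pvFill_untouched ws _ k (fun w hw => hpos w (List.mem_cons_of_mem _ hw)) hnotin]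
      rw [PySem.List.pySetD_of_nonneg _ _ (Int.natCast_nonneg k)]
      simp only [Int.toNat_natCast]
      exact List.getElem?_set_self hk
    · rw [List.foldl_cons]
      exact ih _ k v (fun w hw => hpos w (List.mem_cons_of_mem _ hw)) hndtail hmem'
        (by rw [PySem.List.length_pySetD]; exact hk)

-- ---- facts about pvIdxs / pvWrites ----
theorem pvIdxs_mem (tl : List String) (c : String) (i : Int) (h : i ∈ pvIdxs tl c) :
    ∃ (k : Nat) (hk : k < tl.length), i = (k : Int) ∧ tl[k] = c := by
  simp only [pvIdxs, List.mem_map, List.mem_filter] at h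
  obtain ⟨p, ⟨hpe, hpc⟩, hpi⟩ := h
  rw [PySem.List.mem_enumerate_iff] at hpe
  obtain ⟨k, hk, rfl⟩ := hpe
  exact ⟨k, hk, by simpa using hpi.symm, by simpa using hpc⟩

theorem pvIdxs_nodup (tl : List String) (c : String) : (pvIdxs tl c).Nodup := by
  have h1 : ((PySem.List.enumerate tl).filter (fun p => p.2 == c)).Pairwise (fun p q => p.1 < q.1) :=
    List.Pairwise.filter _ (PySem.List.pairwise_lt_enumerate tl 0)
  have h2 : (pvIdxs tl c).Pairwise (· < ·) := by
    unfold pvIdxs; rw [List.pairwise_map]; exact h1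
  exact h2.imp (fun h => Int.ne_of_lt h)

theorem pvWrites_fst (tl : List String) :
    (pvWrites tl).map (·.1) = (PySem.Set.ofList tl).flatMap (pvIdxs tl) := by
  unfold pvWrites
  rw [List.map_flatMap]
  exact List.flatMap_congr (fun c _ => by
    rw [List.map_map]
    exact PySem.List.map_snd_enumerate _ _)

theorem pvWrites_nodup_fst (tl : List String) : ((pvWrites tl).map (·.1)).Nodup := by
  rw [pvWrites_fst]
  rw [List.nodup_flatMap]
  refine ⟨fun c _ => pvIdxs_nodup tl c, ?_⟩
  have hnd : (PySem.Set.ofList tl).Nodup := PySem.Set.nodup_ofList tl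
  refine hnd.imp (fun {c c'} hne => ?_)
  intro i hi hi'
  obtain ⟨k, hk1, rfl, hc⟩ := pvIdxs_mem tl c i hi
  obtain ⟨k', hk2, hkk, hc'⟩ := pvIdxs_mem tl c' _ hi'
  have hkeq : k = k' := by exact_mod_cast hkk
  subst hkeq
  exact hne (by rw [← hc, ← hc'])

theorem pvWrites_nonneg (tl : List String) : ∀ w ∈ pvWrites tl, 0 ≤ w.1 := by
  intro w hw
  simp only [pvWrites, List.mem_flatMap, List.mem_map] at hw
  obtain ⟨c, _, q, hq, rfl⟩ := hw
  rw [PySem.List.mem_enumerate_iff] at hq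
  obtain ⟨j, hj, rfl⟩ := hq
  simp only
  obtain ⟨k, hklt, hk, _⟩ := pvIdxs_mem tl c _ (List.getElem_mem hj)
  simp [hk]

-- position of the occurrence of c at index k within the filtered index list = its earlier-occurrence count
theorem pvOcc (tl : List String) : ∀ (s k : Nat) (c : String) (hk : k < tl.length), tl[k] = c →
    ((((PySem.List.enumerate tl (s : Int)).filter (fun p => p.2 == c)).map (·.1)))[(tl.take k).count c]? = some ((s + k : Nat) : Int) := by
  induction tl with
  | nil => intro s k c hk _; simp at hk
  | cons x rest ih =>
    intro s k c hk hc
    rw [PySem.List.enumerate_cons]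
    cases k with
    | zero =>
      simp only [List.getElem_cons_zero] at hc
      subst hc
      simp
    | succ k =>
      simp only [List.getElem_cons_succ] at hc
      have hrec := ih (s + 1) k c (by simpa using hk) hc
      rw [show ((s : Int) + 1) = ((s + 1 : Nat) : Int) by push_cast; ring]
      by_cases hx : x = c
      · subst hx
        have hf : (List.filter (fun p => p.2 == x) ((↑s, x) :: PySem.List.enumerate rest ↑(s+1)))
            = (↑s, x) :: List.filter (fun p => p.2 == x) (PySem.List.enumerate rest ↑(s+1)) := by
          simp
        rw [List.take_succ_cons, List.count_cons_self, hf, List.map_cons,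
          List.getElem?_cons_succ, hrec]
        congr 1
        push_cast; ring
      · have hf : (List.filter (fun p => p.2 == c) ((↑s, x) :: PySem.List.enumerate rest ↑(s+1)))
            = List.filter (fun p => p.2 == c) (PySem.List.enumerate rest ↑(s+1)) := by
          simp [hx]
        rw [List.take_succ_cons, List.count_cons_of_ne hx, hf, hrec]
        congr 1
        push_cast; ring

theorem pvWrites_complete (tl : List String) (k : Nat) (hk : k < tl.length) :
    ((k : Int), pvMk tl[k] (((tl.take k).count tl[k] : Int))) ∈ pvWrites tl := by
  have hidx : (pvIdxs tl tl[k])[(tl.take k).count tl[k]]? = some ((k : Int)) := by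
    have := pvOcc tl 0 k tl[k] hk rfl
    simpa [pvIdxs] using this
  have henum : (((tl.take k).count tl[k] : Int), (k : Int)) ∈
      PySem.List.enumerate (pvIdxs tl tl[k]) := by
    have h1 := PySem.List.getElem?_enumerate (pvIdxs tl tl[k]) 0 ((tl.take k).count tl[k])
    rw [hidx] at h1
    have h2 := List.mem_of_getElem? h1
    simpa using h2
  simp only [pvWrites, List.mem_flatMap]
  refine ⟨tl[k], ?_, ?_⟩
  · rw [PySem.Set.mem_ofList]; exact List.getElem_mem hk
  · exact List.mem_map.mpr ⟨_, henum, rfl⟩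

-- ---- B computes pvSpecGo ----
theorem pvB_eq_spec (tl : List String) : make_unique_treat_types_alt tl = pvSpecGo [] tl := by
  show (((PySem.List.enumerate tl).foldl
      (fun (d : PySem.Dict String (List Int)) p => d.modify p.2 [] (fun is => is ++ [p.1]))
      PySem.Dict.empty).items.foldl
    (fun res ci =>
      (PySem.List.enumerate ci.2).foldl
        (fun res q =>
          PySem.List.pySetD res q.2 (if q.1 == 0 then ci.1 else ci.1 ++ "_" ++ PySem.Int.toStr q.1))
        res)
    (List.replicate tl.length "")) = pvSpecGo [] tl
  rw [pvDict_items, pvFoldFold, List.flatMap_map]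
  show (pvWrites tl).foldl (fun res w => PySem.List.pySetD res w.1 w.2)
    (List.replicate tl.length "") = pvSpecGo [] tl
  apply List.ext_getElem?
  intro k
  by_cases hk : k < tl.length
  · rw [pvFill_get (pvWrites tl) _ k _ (pvWrites_nonneg tl) (pvWrites_nodup_fst tl)
      (pvWrites_complete tl k hk) (by simp [hk])]
    rw [pvSpecGo_getElem? tl [] k hk]
    simp
  · rw [List.getElem?_eq_none, List.getElem?_eq_none]
    · rw [pvSpecGo_length]; omega
    · rw [pvFill_length]; simp; omega

-- ===== VERDICT (by name: the statement is the Claim_ definition above) =====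
theorem make_unique_treat_types_spec : Claim_equal_make_unique_treat_types := by
  intro l _
  unfold Spec_make_unique_treat_types make_unique_treat_types
  rw [pvA_loop l [] PySem.Dict.empty [] (by intro c; simp [PySem.Dict.getD])]
  rw [pvB_eq_spec l]
  rfl
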